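-- pv_equiv track=rewrite | github.com/Hegemege/advent-of-code-2019 | 16/solution.py | create_pattern_lookup
-- ===== SOURCE A (Python) =====
-- def create_pattern_lookup(length):
--     """
--         Create a lookup list for the multiplication pattern
--         [0, 1, 0, -1] where each index is repeated N times
--         and the first value is removed
--
--         pattern_lookup[0] = [1, 0, -1, 0, 1, 0, -1, ...]
--         pattern_lookup[1] = [0, 1, 1, 0, 0, -1, -1, 0, 0, 1, 1, ...]
--         pattern_lookup[2] = [0, 0, 1, 1, 1, 0, 0, 0, -1, -1, -1, 0, 0, 0, 1, 1, 1, ...]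
--     """
--     pattern_lookup = []
--     # Create pattern lookups for all indices
--     for i in range(length):
--         pattern_lookup.append([])
--
--         pattern_value = 0
--         pattern_dir = 1
--         pattern_wait = i
--
--         for j in range(length + 1):
--             pattern_lookup[i].append(pattern_value)
--
--             if pattern_wait == 0:
--                 pattern_wait = i
--                 pattern_value += pattern_dir
--                 # Swap the direction to achieve 0, 1, 0, -1; 0, 1, 0, ...
--                 if abs(pattern_value) != 0:
--                     pattern_dir *= -1
--             else:
--                 pattern_wait -= 1
--
--         # Remove the first element
--         pattern_lookup[i].pop(0)
--
--     return pattern_lookup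
-- ===== SOURCE B (Python) =====
-- def create_pattern_lookup(length):
--     """Stateless closed form: cell (i, j) of the table is base[((j+1)//(i+1)) % 4]."""
--     base = [0, 1, 0, -1]
--     return [[base[((j + 1) // (i + 1)) % 4] for j in range(length)]
--             for i in range(length)]
-- ===== Notes on version B (the rewrite author's own statement) =====
-- stated objective: simpler
-- what changed: Replaced A's stateful incremental generation (carried pattern_value/pattern_dir/pattern_wait over length+1 steps plus pop(0)) by a stateless closed form: cell (i,j) is base[((j+1)//(i+1)) % 4] with base=[0,1,0,-1].
import Mathlib
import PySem

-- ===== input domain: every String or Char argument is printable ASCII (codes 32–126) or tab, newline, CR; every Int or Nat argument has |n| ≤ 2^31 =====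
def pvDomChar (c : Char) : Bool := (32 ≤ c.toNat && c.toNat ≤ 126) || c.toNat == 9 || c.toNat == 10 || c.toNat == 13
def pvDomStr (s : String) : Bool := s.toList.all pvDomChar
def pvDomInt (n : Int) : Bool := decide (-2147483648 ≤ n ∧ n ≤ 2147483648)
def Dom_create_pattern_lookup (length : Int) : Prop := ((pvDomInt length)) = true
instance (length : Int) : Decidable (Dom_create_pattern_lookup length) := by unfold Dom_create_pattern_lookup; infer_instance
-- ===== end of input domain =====

-- B replaces A's stateful incremental row generation by a stateless closed form
-- (cell (i,j) = [0,1,0,-1][((j+1)//(i+1)) % 4]); objective: simpler.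

-- ===== PORT A =====
-- one step of A's inner loop body; state = (row, pattern_value, pattern_dir, pattern_wait)
def stepA (i : Int) (st : List Int × Int × Int × Int) : List Int × Int × Int × Int :=
  let row := st.1 ++ [st.2.1]
  if st.2.2.2 == 0 then
    let v := st.2.1 + st.2.2.1
    -- abs(pattern_value) != 0 ported literally as the if-expression below
    (row, v, if (if v < 0 then -v else v) ≠ 0 then st.2.2.1 * (-1) else st.2.2.1, i)
  else
    (row, st.2.1, st.2.2.1, st.2.2.2 - 1)

def create_pattern_lookup (length : Int) : List (List Int) :=
  (PySem.List.pyRange 0 length 1).foldl (fun lookup i =>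
    let st := (PySem.List.pyRange 0 (length + 1) 1).foldl
      (fun st _j => stepA i st) ([], 0, 1, i)
    -- pattern_lookup[i].pop(0): drop the first element of the built row
    lookup ++ [st.1.drop 1]) []

-- ===== PORT B =====
def create_pattern_lookup_alt (length : Int) : List (List Int) :=
  (PySem.List.pyRange 0 length 1).map (fun i =>
    (PySem.List.pyRange 0 length 1).map (fun j =>
      -- base[((j+1)//(i+1)) % 4]; the index is always in [0,4)
      PySem.List.pyGetD [0, 1, 0, -1]
        (PySem.Int.mod (PySem.Int.floordiv (j + 1) (i + 1)) 4) 0))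

-- ===== PRECONDITION & SPEC =====
def Spec_create_pattern_lookup (length : Int) (out : List (List Int)) : Prop := out = create_pattern_lookup_alt length
instance (length : Int) (out : List (List Int)) : Decidable (Spec_create_pattern_lookup length out) := by unfold Spec_create_pattern_lookup; infer_instance

-- ===== CLAIM (what is proved, stated in full; the proofs are below) =====
def Claim_equal_create_pattern_lookup : Prop := ∀ (length : Int), Dom_create_pattern_lookup length → Spec_create_pattern_lookup length (create_pattern_lookup length)

-- ===== LEMMAS AND PROOFS =====

-- the base pattern as a function of the block index q (period 4)
def pat (q : Nat) : Int := if q % 4 = 0 then 0 else if q % 4 = 1 then 1 else if q % 4 = 2 then 0 else -1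
-- the direction A carries, as a function of the block index
def dirf (q : Nat) : Int := if q % 4 = 1 ∨ q % 4 = 2 then -1 else 1

theorem pat_succ (q : Nat) : pat (q + 1) = pat q + dirf q := by
  have h : q % 4 = 0 ∨ q % 4 = 1 ∨ q % 4 = 2 ∨ q % 4 = 3 := by omega
  rcases h with h | h | h | h
  · have h' : (q + 1) % 4 = 1 := by omega
    simp [pat, dirf, h, h']
  · have h' : (q + 1) % 4 = 2 := by omega
    simp [pat, dirf, h, h']
  · have h' : (q + 1) % 4 = 3 := by omega
    simp [pat, dirf, h, h']
  · have h' : (q + 1) % 4 = 0 := by omega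
    simp [pat, dirf, h, h']

theorem dirf_succ (q : Nat) :
    dirf (q + 1) = if (if pat (q + 1) < 0 then -pat (q + 1) else pat (q + 1)) ≠ 0 then dirf q * (-1) else dirf q := by
  have h : q % 4 = 0 ∨ q % 4 = 1 ∨ q % 4 = 2 ∨ q % 4 = 3 := by omega
  rcases h with h | h | h | h
  · have h' : (q + 1) % 4 = 1 := by omega
    simp [pat, dirf, h, h']
  · have h' : (q + 1) % 4 = 2 := by omega
    simp [pat, dirf, h, h']
  · have h' : (q + 1) % 4 = 3 := by omega
    simp [pat, dirf, h, h']
  · have h' : (q + 1) % 4 = 0 := by omega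
    simp [pat, dirf, h, h']

theorem foldl_const {α β : Type} (f : β → β) :
    ∀ (l : List α) (init : β), l.foldl (fun st _ => f st) init = f^[l.length] init := by
  intro l
  induction l with
  | nil => intro init; simp
  | cons x xs ih => intro init; simp [List.foldl_cons, ih, Function.iterate_succ_apply]

theorem iterA (i : Nat) : ∀ (m : Nat),
    (stepA (i : Int))^[m] ([], 0, 1, (i : Int)) =
      ((List.range m).map (fun k => pat (k / (i + 1))),
       pat (m / (i + 1)), dirf (m / (i + 1)), (i : Int) - ((m % (i + 1) : Nat) : Int)) := by
  intro m
  induction m with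
  | zero => simp [pat, dirf]
  | succ m ih =>
    rw [Function.iterate_succ_apply', ih]
    have hpos : 0 < i + 1 := by omega
    have hr : m % (i + 1) < i + 1 := Nat.mod_lt _ hpos
    have hdm := Nat.div_add_mod m (i + 1)
    by_cases hri : m % (i + 1) = i
    · -- pattern_wait == 0 branch
      have hsplit : m + 1 = (i + 1) * (m / (i + 1) + 1) := by rw [Nat.mul_succ]; omega
      have hdiv : (m + 1) / (i + 1) = m / (i + 1) + 1 := by
        rw [hsplit, Nat.mul_div_cancel_left _ hpos]
      have hmod : (m + 1) % (i + 1) = 0 := by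
        rw [hsplit, Nat.mul_mod_right]
      have hcond : ((i : Int) - ((m % (i + 1) : Nat) : Int) == 0) = true := by
        rw [hri]; simp
      simp only [stepA, hcond, if_true]
      rw [hdiv, hmod, pat_succ, ← pat_succ, dirf_succ]
      simp only [Prod.mk.injEq]
      refine ⟨by simp [List.range_succ], trivial, trivial, by simp⟩
    · have hrlt : m % (i + 1) < i := by omega
      have hsplit : m + 1 = (m % (i + 1) + 1) + (i + 1) * (m / (i + 1)) := by omega
      have hdiv : (m + 1) / (i + 1) = m / (i + 1) := by
        rw [hsplit, Nat.add_mul_div_left _ _ hpos, Nat.div_eq_of_lt (by omega)]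
        omega
      have hmod : (m + 1) % (i + 1) = m % (i + 1) + 1 := by
        rw [hsplit, Nat.add_mul_mod_self_left, Nat.mod_eq_of_lt (by omega)]
      have hcond : ((i : Int) - ((m % (i + 1) : Nat) : Int) == 0) = false := by
        simp only [beq_eq_false_iff_ne, ne_eq]
        intro heq
        have : (i : Int) = ((m % (i + 1) : Nat) : Int) := by omega
        have : i = m % (i + 1) := by exact_mod_cast this
        omega
      simp only [stepA, hcond, if_false, Bool.false_eq_true]
      rw [hdiv, hmod]
      simp only [Prod.mk.injEq]
      refine ⟨by simp [List.range_succ], trivial, trivial, by push_cast; ring⟩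

theorem getD_pat (a : Nat) : List.getD [0, 1, 0, -1] (a % 4) (0 : Int) = pat a := by
  have h : a % 4 = 0 ∨ a % 4 = 1 ∨ a % 4 = 2 ∨ a % 4 = 3 := by omega
  rcases h with h | h | h | h <;> simp [pat, h]

theorem altcell (i j : Nat) :
    PySem.List.pyGetD [0, 1, 0, -1]
      (PySem.Int.mod (PySem.Int.floordiv ((j : Int) + 1) ((i : Int) + 1)) 4) 0 = pat ((j + 1) / (i + 1)) := by
  have h1 : ((j : Int) + 1) = ((j + 1 : Nat) : Int) := by push_cast; ring
  have h2 : ((i : Int) + 1) = ((i + 1 : Nat) : Int) := by push_cast; ring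
  have h4 : (4 : Int) = ((4 : Nat) : Int) := rfl
  rw [h1, h2, PySem.Int.floordiv_natCast, h4, PySem.Int.mod_natCast, PySem.List.pyGetD_natCast]
  exact getD_pat _

theorem foldl_app {α β : Type} (g : α → β) :
    ∀ (l : List α) (init : List β),
      l.foldl (fun acc i => acc ++ [g i]) init = init ++ l.map g := by
  intro l
  induction l with
  | nil => intro init; simp
  | cons x xs ih => intro init; simp [List.foldl_cons, ih]

theorem rowA_eq (n i : Nat) :
    ((stepA (i : Int))^[n + 1] ([], 0, 1, (i : Int))).1.drop 1 =
      (List.range n).map (fun j => pat ((j + 1) / (i + 1))) := by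
  rw [iterA]
  simp [List.range_succ_eq_map, List.map_map, Function.comp, Nat.succ_eq_add_one]

-- ===== VERDICT (by name: the statement is the Claim_ definition above) =====
theorem create_pattern_lookup_spec : Claim_equal_create_pattern_lookup := by
  unfold Claim_equal_create_pattern_lookup Spec_create_pattern_lookup
  intro length _
  by_cases hl : length ≤ 0
  · simp [create_pattern_lookup, create_pattern_lookup_alt, PySem.List.pyRange_one_eq_nil hl]
  · rw [not_le] at hl
    obtain ⟨n, rfl⟩ : ∃ n : Nat, length = (n : Int) :=
      ⟨length.toNat, (Int.toNat_of_nonneg (by omega)).symm⟩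
    unfold create_pattern_lookup create_pattern_lookup_alt
    have hsucc : ((n : Int) + 1) = ((n + 1 : Nat) : Int) := by push_cast; ring
    rw [foldl_app, hsucc, PySem.List.pyRange_zero_natCast, PySem.List.pyRange_zero_natCast,
        List.nil_append, List.map_map, List.map_map]
    apply List.map_congr_left
    intro i _
    simp only [Function.comp]
    rw [foldl_const, List.length_map, List.length_range, rowA_eq, List.map_map]
    apply List.map_congr_left
    intro j _
    simpa using (altcell i j).symm
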